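-- pv_equiv track=rewrite | github.com/CiscoTestAutomation/genielibs | pkgs/clean-pkg/src/genie/libs/clean/utils.py | format_missing_key_msg
-- ===== SOURCE A (Python) =====
-- def format_missing_key_msg(missing_list):
--     """Beautifully populate missing keys in to human readable format
--     i.e
--     """
--     # indentation for each nested level
--     indent = 4
--     # find horizontal position of the arrow by using max missing path len plus
--     # max missing key len
--     max_path_len = max(map(len, missing_list))
--     max_key_len = max(map(len, [l[-1] for l in missing_list]))
--
--     missing_dict = {}
--     for missing_key in missing_list:
--         d = missing_dict
--         for path in missing_key:
--                 d = d.setdefault(path, {})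
--
--     return _pprint_missing_key(missing_dict, max_path_len, max_key_len, indent)
--
-- def _pprint_missing_key(missing_dict, max_path_len, max_key_len, indent):
--     """format missing key dict into a yaml-like human readable output"""
--     def __pprint_missing_key(missing_dict, lines, level=0):
--
--         for key, value in missing_dict.items():
--             line = []
--             # indentation
--             line.extend([' '] * indent * level)
--             # key and colon
--             line.extend([key, ':'])
--             if value:
--
--                 lines.append(''.join(line))
--                 __pprint_missing_key(value, lines, level=level+1)
--
--             else:
--                 key_len = len(key)
--                 line.extend([' '] * (
--                             indent * (max_path_len - level) + (max_key_len - key_len)))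
--                 line.append('   <<<')
--                 lines.append(''.join(line))
--
--     lines = []
--     __pprint_missing_key(missing_dict, lines)
--     return '\n'.join(lines)
-- ===== SOURCE B (Python) =====
-- def format_missing_key_msg(missing_list):
--     """Divide-and-conquer directly on the list of key-paths: group the paths by
--     their first key (first-appearance order) and recurse on the tails; no dict
--     trie is built at all."""
--     indent = 4
--     max_path_len = max(map(len, missing_list))
--     max_key_len = max(len(l[-1]) for l in missing_list)
--
--     def emit(paths, level):
--         if not paths:
--             return []
--         key = paths[0][0]
--         group = [p[1:] for p in paths if p[0] == key]
--         rest = [p for p in paths if p[0] != key]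
--         tails = [t for t in group if t]
--         if tails:
--             return ([' ' * (indent * level) + key + ':']
--                     + emit(tails, level + 1) + emit(rest, level))
--         pad = indent * (max_path_len - level) + (max_key_len - len(key))
--         return [' ' * (indent * level) + key + ':' + ' ' * pad + '   <<<'] + emit(rest, level)
--
--     return '\n'.join(emit(missing_list, 0))
-- ===== Notes on version B (the rewrite author's own statement) =====
-- stated objective: alternative
-- what changed: B drops A's nested-dict trie entirely: it is a divide-and-conquer over the path list that groups paths by their first key (first-appearance order) and recurses on the nonempty tails and the remaining paths, building lines by direct string concatenation instead of A's per-character list building and join over a mutated accumulator.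
import Mathlib
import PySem

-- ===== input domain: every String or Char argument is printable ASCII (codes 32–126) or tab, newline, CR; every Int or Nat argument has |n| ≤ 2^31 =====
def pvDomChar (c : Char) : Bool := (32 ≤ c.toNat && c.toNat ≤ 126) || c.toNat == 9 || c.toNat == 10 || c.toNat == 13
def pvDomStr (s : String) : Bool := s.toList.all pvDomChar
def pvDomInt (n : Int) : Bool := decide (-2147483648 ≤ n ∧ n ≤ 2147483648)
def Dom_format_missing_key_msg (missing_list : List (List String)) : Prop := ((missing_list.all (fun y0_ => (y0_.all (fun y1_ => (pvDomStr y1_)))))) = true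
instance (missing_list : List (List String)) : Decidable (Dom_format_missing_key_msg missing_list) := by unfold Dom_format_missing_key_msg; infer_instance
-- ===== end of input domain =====

-- B replaces A's dict-trie build + recursive pretty-printer by a divide-and-conquer
-- directly on the path list: group paths by first key and recurse on the tails
-- (objective: alternative decomposition, same cost).

-- ===== PORT A =====
-- The nested dict-of-dicts (first-child / next-sibling encoding, insertion order
-- preserved: a new key is appended at the end of the sibling chain, exactly as
-- dict.setdefault appends a fresh key).
inductive Trie : Type
  | nil : Trie
  | node : String → Trie → Trie → Trie

-- Python's truthiness test `if value:` on a dict = "is it non-empty?"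
def Trie.isNil : Trie → Bool
  | Trie.nil => true
  | Trie.node _ _ _ => false

-- d.setdefault(path, {}) on one level: find key k in the sibling chain (append
-- a fresh empty node if absent) and apply f to its child dict
def updateChain (chain : Trie) (k : String) (f : Trie → Trie) : Trie :=
  match chain with
  | Trie.nil => Trie.node k (f Trie.nil) Trie.nil
  | Trie.node k' c s =>
      if k = k' then Trie.node k' (f c) s
      else Trie.node k' c (updateChain s k f)

-- one pass of the inner `for path in missing_key: d = d.setdefault(path, {})`
def trieInsert (t : Trie) : List String → Trie
  | [] => t
  | k :: ks => updateChain t k (fun c => trieInsert c ks)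

-- the `for missing_key in missing_list` build loop
def buildTrie (missing_list : List (List String)) : Trie :=
  missing_list.foldl trieInsert Trie.nil

-- ' ' * n  (Python: empty string for n ≤ 0)
def pySpaces (n : Int) : String := PySem.Str.join "" (List.replicate n.toNat " ")

-- __pprint_missing_key: recursion over the dict (sibling chain = items order)
def pprintA (maxp maxk indent : Int) : Trie → Int → List String → List String
  | Trie.nil, _, lines => lines
  | Trie.node k c s, level, lines =>
      if Trie.isNil c = false then
        let lines' := pprintA maxp maxk indent c (level + 1)
                        (lines ++ [pySpaces (indent * level) ++ k ++ ":"])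
        pprintA maxp maxk indent s level lines'
      else
        pprintA maxp maxk indent s level
          (lines ++ [pySpaces (indent * level) ++ k ++ ":" ++
                     pySpaces (indent * (maxp - level) + (maxk - PySem.Str.len k)) ++ "   <<<"])

def format_missing_key_msg (missing_list : List (List String)) : String :=
  let indent : Int := 4
  -- max(...) raises ValueError on an empty list and l[-1] raises IndexError on an
  -- empty inner list; both are excluded by Pre_ (getD defaults are unreachable there)
  let max_path_len : Int :=
    (PySem.List.max? (missing_list.map (fun l => (l.length : Int))) (fun x => x)).getD 0
  let max_key_len : Int :=
    (PySem.List.max?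
      (missing_list.map (fun l => PySem.Str.len ((PySem.List.pyGet? l (-1)).getD "")))
      (fun x => x)).getD 0
  PySem.Str.join "\n" (pprintA max_path_len max_key_len indent (buildTrie missing_list) 0 [])

-- ===== PORT B =====
-- group = [p[1:] for p in paths if p[0] == key]
def pvGroupOf (k : String) (paths : List (List String)) : List (List String) :=
  paths.filterMap (fun p => if p.head? = some k then some p.tail else none)

-- rest = [p for p in paths if p[0] != key]
def pvRestOf (k : String) (paths : List (List String)) : List (List String) :=
  paths.filter (fun p => !(p.head? == some k))

-- measure used only for termination of emitB: number of paths + total length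
def pvM (paths : List (List String)) : Nat :=
  paths.length + (paths.map List.length).sum

theorem pvM_tails_le (k : String) (paths : List (List String)) :
    pvM ((pvGroupOf k paths).filter (fun t => !t.isEmpty)) ≤ (paths.map List.length).sum := by
  induction paths with
  | nil => simp [pvGroupOf, pvM]
  | cons p ps ih =>
      cases p with
      | nil =>
          have h1 : pvGroupOf k ([] :: ps) = pvGroupOf k ps := by simp [pvGroupOf]
          rw [h1]
          simp only [List.map_cons, List.sum_cons, List.length_nil]
          omega
      | cons x xs =>
          by_cases hk : x = k
          · have h1 : pvGroupOf k ((x :: xs) :: ps) = xs :: pvGroupOf k ps := by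
              simp [pvGroupOf, hk]
            rw [h1]
            cases xs with
            | nil =>
                have h2 : (([] : List String) :: pvGroupOf k ps).filter (fun t => !t.isEmpty) =
                    (pvGroupOf k ps).filter (fun t => !t.isEmpty) := by simp
                rw [h2]
                simp only [List.map_cons, List.sum_cons, List.length_cons, List.length_nil]
                omega
            | cons y ys =>
                have h2 : ((y :: ys) :: pvGroupOf k ps).filter (fun t => !t.isEmpty) =
                    (y :: ys) :: (pvGroupOf k ps).filter (fun t => !t.isEmpty) := by simp
                rw [h2]
                simp only [pvM, List.length_cons, List.map_cons, List.sum_cons] at ih ⊢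
                omega
          · have h1 : pvGroupOf k ((x :: xs) :: ps) = pvGroupOf k ps := by
              simp [pvGroupOf, hk]
            rw [h1]
            simp only [List.map_cons, List.sum_cons]
            omega

theorem pvM_filter_le (f : List String → Bool) (l : List (List String)) :
    pvM (l.filter f) ≤ pvM l := by
  induction l with
  | nil => simp [pvM]
  | cons p ps ih =>
      rw [List.filter_cons]
      by_cases h : f p = true
      · rw [if_pos h]
        simp only [pvM, List.length_cons, List.map_cons, List.sum_cons] at ih ⊢
        omega
      · rw [if_neg h]
        simp only [pvM, List.length_cons, List.map_cons, List.sum_cons] at ih ⊢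
        omega

theorem pvM_tails_lt (k : String) (q : List String) (ps : List (List String)) :
    pvM ((pvGroupOf k (q :: ps)).filter (fun t => !t.isEmpty)) < pvM (q :: ps) := by
  have h := pvM_tails_le k (q :: ps)
  simp only [pvM, List.length_cons, List.map_cons, List.sum_cons] at h ⊢
  omega

theorem pvM_rest_lt (k : String) (ks : List String) (ps : List (List String)) :
    pvM (pvRestOf k ((k :: ks) :: ps)) < pvM ((k :: ks) :: ps) := by
  have h1 : pvRestOf k ((k :: ks) :: ps) = pvRestOf k ps := by
    simp [pvRestOf, List.filter_cons]
  have h2 := pvM_filter_le (fun p => !(p.head? == some k)) ps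
  rw [h1]
  simp only [pvRestOf] at h2 ⊢
  simp only [pvM, List.length_cons, List.map_cons, List.sum_cons] at h2 ⊢
  omega

-- B's emit: pick the first path's head key, split paths into its group and the
-- rest, recurse on the nonempty tails (children) and on the rest (siblings)
def emitB (maxp maxk indent : Int) : List (List String) → Int → List String
  | [], _ => []
  | [] :: ps, level => emitB maxp maxk indent ps level
      -- unreachable under Pre_: Python's paths[0][0] raises IndexError there
  | (k :: ks) :: ps, level =>
      let tails := (pvGroupOf k ((k :: ks) :: ps)).filter (fun t => !t.isEmpty)
      let rest := pvRestOf k ((k :: ks) :: ps)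
      if tails ≠ [] then
        (pySpaces (indent * level) ++ k ++ ":") ::
          (emitB maxp maxk indent tails (level + 1) ++ emitB maxp maxk indent rest level)
      else
        (pySpaces (indent * level) ++ k ++ ":" ++
          pySpaces (indent * (maxp - level) + (maxk - PySem.Str.len k)) ++ "   <<<") ::
          emitB maxp maxk indent rest level
termination_by paths _ => pvM paths
decreasing_by
  all_goals first
    | (simp only [pvM, List.length_cons, List.length_nil, List.map_cons, List.sum_cons]; omega)
    | exact pvM_tails_lt k (k :: ks) ps
    | exact pvM_rest_lt k ks ps

def format_missing_key_msg_alt (missing_list : List (List String)) : String :=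
  let indent : Int := 4
  let max_path_len : Int :=
    (PySem.List.max? (missing_list.map (fun l => (l.length : Int))) (fun x => x)).getD 0
  let max_key_len : Int :=
    (PySem.List.max?
      (missing_list.map (fun l => PySem.Str.len ((PySem.List.pyGet? l (-1)).getD "")))
      (fun x => x)).getD 0
  PySem.Str.join "\n" (emitB max_path_len max_key_len indent missing_list 0)

-- ===== PRECONDITION & SPEC =====
-- Pre_ excludes exactly the inputs where A raises: an empty missing_list
-- (ValueError from max) or an empty inner list (IndexError from l[-1]).
def Pre_format_missing_key_msg (missing_list : List (List String)) : Prop :=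
  missing_list ≠ [] ∧ ∀ l ∈ missing_list, l ≠ []
instance (missing_list : List (List String)) : Decidable (Pre_format_missing_key_msg missing_list) := by
  unfold Pre_format_missing_key_msg; infer_instance

def pvWitness_format_missing_key_msg : List (List String) := [["a", "b"], ["a"], ["ccc"]]

def Spec_format_missing_key_msg (missing_list : List (List String)) (out : String) : Prop := out = format_missing_key_msg_alt missing_list
instance (missing_list : List (List String)) (out : String) : Decidable (Spec_format_missing_key_msg missing_list out) := by unfold Spec_format_missing_key_msg; infer_instance

-- ===== CLAIM (what is proved, stated in full; the proofs are below) =====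
def Claim_equal_format_missing_key_msg : Prop := ∀ (missing_list : List (List String)), Dom_format_missing_key_msg missing_list → Pre_format_missing_key_msg missing_list → Spec_format_missing_key_msg missing_list (format_missing_key_msg missing_list)

-- ===== LEMMAS AND PROOFS =====

-- A's printer without the accumulator
def preorderA (maxp maxk indent : Int) : Trie → Int → List String
  | Trie.nil, _ => []
  | Trie.node k c s, level =>
      if Trie.isNil c = false then
        (pySpaces (indent * level) ++ k ++ ":") ::
          (preorderA maxp maxk indent c (level + 1) ++ preorderA maxp maxk indent s level)
      else
        (pySpaces (indent * level) ++ k ++ ":" ++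
          pySpaces (indent * (maxp - level) + (maxk - PySem.Str.len k)) ++ "   <<<") ::
          preorderA maxp maxk indent s level

theorem pprintA_acc (maxp maxk indent : Int) (t : Trie) (level : Int) (lines : List String) :
    pprintA maxp maxk indent t level lines = lines ++ preorderA maxp maxk indent t level := by
  induction t generalizing level lines with
  | nil => simp [pprintA, preorderA]
  | node k c s ihc ihs =>
      by_cases h : Trie.isNil c = false
      · simp [pprintA, preorderA, h, ihc, ihs]
      · simp [pprintA, preorderA, h, ihs]

-- the trie B's grouping recursion would build (proof device only)
def groupTrie : List (List String) → Trie
  | [] => Trie.nil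
  | [] :: ps => groupTrie ps
  | (k :: ks) :: ps =>
      Trie.node k (groupTrie ((pvGroupOf k ((k :: ks) :: ps)).filter (fun t => !t.isEmpty)))
                  (groupTrie (pvRestOf k ((k :: ks) :: ps)))
termination_by paths => pvM paths
decreasing_by
  all_goals first
    | (simp only [pvM, List.length_cons, List.length_nil, List.map_cons, List.sum_cons]; omega)
    | exact pvM_tails_lt k (k :: ks) ps
    | exact pvM_rest_lt k ks ps

theorem group_append_hit (k : String) (paths : List (List String)) (ks : List String) :
    pvGroupOf k (paths ++ [k :: ks]) = pvGroupOf k paths ++ [ks] := by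
  simp [pvGroupOf]

theorem group_append_miss (k : String) (paths : List (List String)) (p : List String)
    (h : ¬ p.head? = some k) :
    pvGroupOf k (paths ++ [p]) = pvGroupOf k paths := by
  simp [pvGroupOf, h]

theorem rest_append_hit (k : String) (paths : List (List String)) (ks : List String) :
    pvRestOf k (paths ++ [k :: ks]) = pvRestOf k paths := by
  simp [pvRestOf]

theorem rest_append_miss (k : String) (paths : List (List String)) (p : List String)
    (h : ¬ p.head? = some k) :
    pvRestOf k (paths ++ [p]) = pvRestOf k paths ++ [p] := by
  simp [pvRestOf, h]

theorem trieInsert_node_eq (k : String) (C S : Trie) (js : List String) :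
    trieInsert (Trie.node k C S) (k :: js) = Trie.node k (trieInsert C js) S := by
  simp [trieInsert, updateChain]

theorem trieInsert_node_ne (k j : String) (C S : Trie) (js : List String) (h : j ≠ k) :
    trieInsert (Trie.node k C S) (j :: js) = Trie.node k C (trieInsert S (j :: js)) := by
  simp [trieInsert, updateChain, h]

theorem insert_groupTrie :
    ∀ (n : Nat) (paths : List (List String)) (p : List String),
      pvM paths + p.length ≤ n →
      trieInsert (groupTrie paths) p = groupTrie (paths ++ [p]) := by
  intro n
  induction n with
  | zero =>
      intro paths p h
      cases paths with
      | nil =>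
          cases p with
          | nil => simp [groupTrie, trieInsert]
          | cons j js =>
              simp only [pvM, List.length_nil, List.map_nil, List.sum_nil,
                List.length_cons] at h
              omega
      | cons q ps =>
          simp only [pvM, List.length_cons] at h
          omega
  | succ n ih =>
      intro paths p h
      match paths with
      | [] =>
          match p with
          | [] => simp [groupTrie, trieInsert]
          | j :: js =>
              have hnil : groupTrie ([] : List (List String)) = Trie.nil := by
                simp [groupTrie]
              have hj : trieInsert (groupTrie []) js = groupTrie ([] ++ [js]) := by
                apply ih; simp [pvM] at h ⊢; omega
              rw [hnil, List.nil_append] at hj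
              match js, hj with
              | [], hj =>
                  simp [groupTrie, trieInsert, updateChain, pvGroupOf, pvRestOf]
              | y :: ys, hj =>
                  show updateChain (groupTrie []) j (fun c => trieInsert c (y :: ys)) =
                    groupTrie ([] ++ [j :: y :: ys])
                  rw [hnil, List.nil_append]
                  simp only [updateChain]
                  rw [hj]
                  have hX : groupTrie [j :: y :: ys] =
                      Trie.node j (groupTrie [y :: ys]) (groupTrie []) := by
                    simp [groupTrie, pvGroupOf, pvRestOf]
                  rw [hX, hnil]
      | [] :: ps =>
          have h1 : groupTrie ([] :: ps) = groupTrie ps := by simp [groupTrie]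
          have h2 : groupTrie (([] :: ps) ++ [p]) = groupTrie (ps ++ [p]) := by
            simp only [List.cons_append]; simp [groupTrie]
          rw [h1, h2]
          apply ih; simp [pvM] at h ⊢; omega
      | (k :: ks) :: ps =>
          have hG : groupTrie ((k :: ks) :: ps) =
              Trie.node k
                (groupTrie ((pvGroupOf k ((k :: ks) :: ps)).filter (fun t => !t.isEmpty)))
                (groupTrie (pvRestOf k ((k :: ks) :: ps))) := by
            simp [groupTrie]
          match p with
          | [] =>
              have hrest : trieInsert (groupTrie (pvRestOf k ((k :: ks) :: ps))) [] =
                  groupTrie (pvRestOf k ((k :: ks) :: ps) ++ [[]]) := by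
                apply ih
                have := pvM_rest_lt k ks ps
                simp [pvM] at h ⊢; simp [pvM] at this; omega
              have hrest' : groupTrie (pvRestOf k ((k :: ks) :: ps) ++ [[]]) =
                  groupTrie (pvRestOf k ((k :: ks) :: ps)) := by
                rw [← hrest]; rfl
              have hG2 : groupTrie (((k :: ks) :: ps) ++ [[]]) =
                  Trie.node k
                    (groupTrie ((pvGroupOf k (((k :: ks) :: ps) ++ [[]])).filter (fun t => !t.isEmpty)))
                    (groupTrie (pvRestOf k (((k :: ks) :: ps) ++ [[]]))) := by
                simp only [List.cons_append]; simp [groupTrie]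
              have hh : ¬ (([] : List String).head? = some k) := by simp
              rw [hG, hG2, group_append_miss k _ _ hh, rest_append_miss k _ _ hh, hrest']
              rfl
          | j :: js =>
              by_cases hjk : j = k
              · subst hjk
                have htails : trieInsert
                    (groupTrie ((pvGroupOf j ((j :: ks) :: ps)).filter (fun t => !t.isEmpty))) js =
                    groupTrie ((pvGroupOf j ((j :: ks) :: ps)).filter (fun t => !t.isEmpty) ++ [js]) := by
                  apply ih
                  have := pvM_tails_lt j (j :: ks) ps
                  simp [pvM] at h ⊢; simp [pvM] at this; omega
                have hG2 : groupTrie (((j :: ks) :: ps) ++ [j :: js]) =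
                    Trie.node j
                      (groupTrie ((pvGroupOf j (((j :: ks) :: ps) ++ [j :: js])).filter (fun t => !t.isEmpty)))
                      (groupTrie (pvRestOf j (((j :: ks) :: ps) ++ [j :: js]))) := by
                  simp only [List.cons_append]; simp [groupTrie]
                rw [hG, hG2, group_append_hit, rest_append_hit, List.filter_append,
                  trieInsert_node_eq]
                cases js with
                | nil => simp [List.filter, trieInsert]
                | cons y ys => simp [List.filter, htails]
              · have hrest : trieInsert (groupTrie (pvRestOf k ((k :: ks) :: ps))) (j :: js) =
                    groupTrie (pvRestOf k ((k :: ks) :: ps) ++ [j :: js]) := by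
                  apply ih
                  have := pvM_rest_lt k ks ps
                  simp [pvM] at h ⊢; simp [pvM] at this; omega
                have hG2 : groupTrie (((k :: ks) :: ps) ++ [j :: js]) =
                    Trie.node k
                      (groupTrie ((pvGroupOf k (((k :: ks) :: ps) ++ [j :: js])).filter (fun t => !t.isEmpty)))
                      (groupTrie (pvRestOf k (((k :: ks) :: ps) ++ [j :: js]))) := by
                  simp only [List.cons_append]; simp [groupTrie]
                have hh : ¬ ((j :: js : List String).head? = some k) := by
                  simp [List.head?_cons, hjk]
                rw [hG, hG2, group_append_miss k _ _ hh, rest_append_miss k _ _ hh,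
                  trieInsert_node_ne k j _ _ _ hjk, hrest]

theorem buildTrie_eq_groupTrie (paths : List (List String)) :
    buildTrie paths = groupTrie paths := by
  induction paths using List.reverseRecOn with
  | nil => simp [buildTrie, groupTrie]
  | append_singleton ps p ih =>
      have : buildTrie (ps ++ [p]) = trieInsert (buildTrie ps) p := by
        simp [buildTrie, List.foldl_append]
      rw [this, ih]
      exact insert_groupTrie (pvM ps + p.length) ps p le_rfl

theorem groupTrie_nil_of_filter (ts : List (List String))
    (hne : ∀ t ∈ ts, t ≠ []) :
    (groupTrie ts = Trie.nil ↔ ts = []) := by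
  match ts with
  | [] => simp [groupTrie]
  | [] :: ps => exact absurd rfl (hne [] (by simp))
  | (k :: ks) :: ps =>
      constructor
      · intro hcon
        rw [show groupTrie ((k :: ks) :: ps) =
          Trie.node k (groupTrie ((pvGroupOf k ((k :: ks) :: ps)).filter (fun t => !t.isEmpty)))
            (groupTrie (pvRestOf k ((k :: ks) :: ps))) from by simp [groupTrie]] at hcon
        exact absurd hcon (by simp)
      · intro hcon
        exact absurd hcon (by simp)

theorem preorder_groupTrie :
    ∀ (n : Nat) (maxp maxk indent : Int) (paths : List (List String)) (level : Int),
      pvM paths ≤ n →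
      preorderA maxp maxk indent (groupTrie paths) level = emitB maxp maxk indent paths level := by
  intro n
  induction n with
  | zero =>
      intro maxp maxk indent paths level h
      cases paths with
      | nil => simp [groupTrie, preorderA, emitB]
      | cons q ps =>
          simp only [pvM, List.length_cons] at h
          omega
  | succ n ih =>
      intro maxp maxk indent paths level h
      match paths with
      | [] => simp [groupTrie, preorderA, emitB]
      | [] :: ps =>
          rw [show groupTrie ([] :: ps) = groupTrie ps from by simp [groupTrie],
            show emitB maxp maxk indent ([] :: ps) level = emitB maxp maxk indent ps level from by
              simp [emitB]]
          apply ih; simp [pvM] at h ⊢; omega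
      | (k :: ks) :: ps =>
          have htl := pvM_tails_lt k (k :: ks) ps
          have hrl := pvM_rest_lt k ks ps
          have htails := ih maxp maxk indent
            ((pvGroupOf k ((k :: ks) :: ps)).filter (fun t => !t.isEmpty)) (level + 1)
            (by omega)
          have hrest := ih maxp maxk indent (pvRestOf k ((k :: ks) :: ps)) level (by omega)
          rw [show groupTrie ((k :: ks) :: ps) =
            Trie.node k (groupTrie ((pvGroupOf k ((k :: ks) :: ps)).filter (fun t => !t.isEmpty)))
              (groupTrie (pvRestOf k ((k :: ks) :: ps))) from by simp [groupTrie]]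
          have hne : ∀ t ∈ (pvGroupOf k ((k :: ks) :: ps)).filter (fun t => !t.isEmpty), t ≠ [] := by
            intro t ht
            have := List.of_mem_filter ht
            simpa using this
          conv_rhs => rw [emitB]
          by_cases hcase : (pvGroupOf k ((k :: ks) :: ps)).filter (fun t => !t.isEmpty) = []
          · have hnil : groupTrie ((pvGroupOf k ((k :: ks) :: ps)).filter (fun t => !t.isEmpty)) = Trie.nil :=
              (groupTrie_nil_of_filter _ hne).mpr hcase
            rw [hnil]
            simp only [preorderA, Trie.isNil, Bool.true_eq_false, reduceIte, hcase, ne_eq,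
              not_true_eq_false, if_false]
            rw [hrest]
          · have hnn : groupTrie ((pvGroupOf k ((k :: ks) :: ps)).filter (fun t => !t.isEmpty)) ≠ Trie.nil := by
              intro hcon; exact hcase ((groupTrie_nil_of_filter _ hne).mp hcon)
            have hfalse : Trie.isNil (groupTrie ((pvGroupOf k ((k :: ks) :: ps)).filter (fun t => !t.isEmpty))) = false := by
              cases hg : groupTrie ((pvGroupOf k ((k :: ks) :: ps)).filter (fun t => !t.isEmpty)) with
              | nil => exact absurd hg hnn
              | node _ _ _ => simp [Trie.isNil]
            simp only [preorderA, hfalse, reduceIte, hcase, ne_eq, not_false_eq_true, if_true]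
            rw [htails, hrest]

theorem ports_agree (missing_list : List (List String)) :
    format_missing_key_msg missing_list = format_missing_key_msg_alt missing_list := by
  unfold format_missing_key_msg format_missing_key_msg_alt
  simp only [pprintA_acc, List.nil_append, buildTrie_eq_groupTrie,
    preorder_groupTrie (pvM missing_list) _ _ _ missing_list 0 le_rfl]

-- ===== VERDICT (by name: the statement is the Claim_ definition above) =====
theorem format_missing_key_msg_spec : Claim_equal_format_missing_key_msg := by
  intro missing_list _ _
  unfold Spec_format_missing_key_msg
  exact ports_agree missing_list
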